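-- pv_equiv track=rewrite | github.com/YongceLi/interactive-decision-support-system | user_sim_car/graph.py | build_truncated_history
-- ===== SOURCE A (Python) =====
-- from typing import Any, Callable, Dict, List, Optional, Tuple, TypedDict
--
-- _HISTORY_TOKEN_LIMIT = 20_000
--
-- _APPROX_CHARS_PER_TOKEN = 4
--
-- class HistoryMessage(TypedDict):
--     role: str
--     content: str
--
-- def build_truncated_history(turns: List["Turn"]) -> List[HistoryMessage]:
--     """Return a token-bounded message history using only user/assistant text."""
--     messages: List[HistoryMessage] = []
--     for turn in turns or []:
--         user_text = turn.get("user_text")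
--         if user_text:
--             messages.append({"role": "user", "content": str(user_text)})
--         assistant_text = turn.get("assistant_text")
--         if assistant_text:
--             messages.append({"role": "assistant", "content": str(assistant_text)})
--
--     if not messages:
--         return []
--
--     max_chars = _HISTORY_TOKEN_LIMIT * _APPROX_CHARS_PER_TOKEN
--     total_chars = 0
--     trimmed: List[HistoryMessage] = []
--     for message in reversed(messages):
--         total_chars += len(message["content"])
--         trimmed.append(message)
--         if total_chars >= max_chars:
--             break
--     trimmed.reverse()
--     return trimmed
-- ===== SOURCE B (Python) =====
-- from typing import List
--
-- _HISTORY_TOKEN_LIMIT = 20_000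
--
-- _APPROX_CHARS_PER_TOKEN = 4
--
--
-- def build_truncated_history(turns):
--     """Token-bounded history: build messages, then drop the longest prefix whose
--     removal still leaves at least max_chars, via a forward subtractive pass."""
--     messages = [
--         {"role": role, "content": str(text)}
--         for turn in (turns or [])
--         for role, key in (("user", "user_text"), ("assistant", "assistant_text"))
--         if (text := turn.get(key))
--     ]
--     max_chars = _HISTORY_TOKEN_LIMIT * _APPROX_CHARS_PER_TOKEN
--     remaining = sum(len(m["content"]) for m in messages)
--     i = 0
--     while i < len(messages) and remaining - len(messages[i]["content"]) >= max_chars: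
--         remaining -= len(messages[i]["content"])
--         i += 1
--     return messages[i:]
-- ===== Notes on version B (the rewrite author's own statement) =====
-- stated objective: alternative
-- what changed: B builds the messages with a single flat comprehension over a (role, key) table and trims by one forward pass that subtracts dropped lengths from the precomputed total, instead of A's reverse iteration with a running sum, break, and final reverse.
import Mathlib
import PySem

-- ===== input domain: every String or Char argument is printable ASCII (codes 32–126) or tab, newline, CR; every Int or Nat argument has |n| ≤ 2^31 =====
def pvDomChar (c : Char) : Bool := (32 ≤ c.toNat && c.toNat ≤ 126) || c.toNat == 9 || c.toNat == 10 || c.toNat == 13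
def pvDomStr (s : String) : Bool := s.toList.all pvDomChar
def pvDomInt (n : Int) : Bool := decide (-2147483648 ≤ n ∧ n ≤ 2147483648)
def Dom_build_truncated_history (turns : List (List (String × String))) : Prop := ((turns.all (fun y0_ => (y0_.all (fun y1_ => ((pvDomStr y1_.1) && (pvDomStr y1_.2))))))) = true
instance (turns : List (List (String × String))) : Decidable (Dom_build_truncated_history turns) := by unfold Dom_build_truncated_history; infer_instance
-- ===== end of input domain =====

-- B builds the messages with a flat role-table comprehension and trims with a forward
-- subtractive drop pass (no reversal) instead of A's reverse-accumulate-then-reverse; objective: alternative.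

-- shared trivial accessors: 20_000 * 4 and len(message["content"]) (every message built carries "content")
def pvMaxChars : Nat := 20000 * 4
def pvContentLen (m : List (String × String)) : Nat :=
  (((PySem.Dict.mk m).get? "content").getD "").length

-- ===== PORT A =====
-- one iteration of A's message-building loop: append user msg if truthy, then assistant msg if truthy
def pvStepA (acc : List (List (String × String))) (turn : List (String × String)) : List (List (String × String)) :=
  let acc :=
    match (PySem.Dict.mk turn).get? "user_text" with
    | some s => if s ≠ "" then acc ++ [[("role", "user"), ("content", s)]] else acc
    | none => acc
  match (PySem.Dict.mk turn).get? "assistant_text" with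
  | some s => if s ≠ "" then acc ++ [[("role", "assistant"), ("content", s)]] else acc
  | none => acc

def pvBuildA (turns : List (List (String × String))) : List (List (String × String)) :=
  turns.foldl pvStepA []

-- for message in reversed(messages): total += len; trimmed.append(message); if total >= max: break
def pvTrimA : List (List (String × String)) → Nat → List (List (String × String)) → List (List (String × String))
  | [], _, trimmed => trimmed
  | m :: rest, total, trimmed =>
    let total := total + pvContentLen m
    let trimmed := trimmed ++ [m]
    if pvMaxChars ≤ total then trimmed else pvTrimA rest total trimmed

def build_truncated_history (turns : List (List (String × String))) : List (List (String × String)) :=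
  let messages := pvBuildA turns
  if messages = [] then []
  else (pvTrimA messages.reverse 0 []).reverse

-- ===== PORT B =====
-- flat comprehension over (role, key) table
def pvTurnB (turn : List (String × String)) : List (List (String × String)) :=
  [("user", "user_text"), ("assistant", "assistant_text")].filterMap (fun rk =>
    match (PySem.Dict.mk turn).get? rk.2 with
    | some s => if s ≠ "" then some [("role", rk.1), ("content", s)] else none
    | none => none)

def pvBuildB (turns : List (List (String × String))) : List (List (String × String)) :=
  turns.flatMap pvTurnB

-- while i < len(messages) and remaining - len(messages[i]) >= max: drop; return messages[i:]
def pvDropB : List (List (String × String)) → Nat → List (List (String × String))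
  | [], _ => []
  | m :: rest, remaining =>
    if pvMaxChars ≤ remaining - pvContentLen m then pvDropB rest (remaining - pvContentLen m)
    else m :: rest

def build_truncated_history_alt (turns : List (List (String × String))) : List (List (String × String)) :=
  let messages := pvBuildB turns
  pvDropB messages ((messages.map pvContentLen).sum)

-- ===== PRECONDITION & SPEC =====
def Spec_build_truncated_history (turns : List (List (String × String))) (out : List (List (String × String))) : Prop := out = build_truncated_history_alt turns
instance (turns : List (List (String × String))) (out : List (List (String × String))) : Decidable (Spec_build_truncated_history turns out) := by unfold Spec_build_truncated_history; infer_instance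

-- ===== CLAIM (what is proved, stated in full; the proofs are below) =====
def Claim_equal_build_truncated_history : Prop := ∀ (turns : List (List (String × String))), Dom_build_truncated_history turns → Spec_build_truncated_history turns (build_truncated_history turns)

-- ===== LEMMAS AND PROOFS =====

theorem pvStep_eq (acc : List (List (String × String))) (turn : List (String × String)) :
    pvStepA acc turn = acc ++ pvTurnB turn := by
  simp only [pvStepA, pvTurnB, List.filterMap_cons, List.filterMap_nil]
  cases (PySem.Dict.mk turn).get? "user_text" <;>
    cases (PySem.Dict.mk turn).get? "assistant_text" <;>
    simp <;> split_ifs <;> simp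

theorem pvBuildA_acc (turns : List (List (String × String))) :
    ∀ acc : List (List (String × String)),
      turns.foldl pvStepA acc = acc ++ turns.flatMap pvTurnB := by
  induction turns with
  | nil => intro acc; simp
  | cons t rest ih =>
    intro acc
    simp only [List.foldl_cons, List.flatMap_cons, pvStep_eq, ih, List.append_assoc]

theorem pvBuild_eq (turns : List (List (String × String))) : pvBuildA turns = pvBuildB turns := by
  simpa [pvBuildA, pvBuildB] using pvBuildA_acc turns []

-- accumulator-free form of A's trim loop
def pvTrimCore : List (List (String × String)) → Nat → List (List (String × String))
  | [], _ => []
  | m :: rest, total =>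
    m :: (if pvMaxChars ≤ total + pvContentLen m then [] else pvTrimCore rest (total + pvContentLen m))

theorem pvTrimA_eq_core (l : List (List (String × String))) :
    ∀ total trimmed, pvTrimA l total trimmed = trimmed ++ pvTrimCore l total := by
  induction l with
  | nil => intro t tr; simp [pvTrimA, pvTrimCore]
  | cons m rest ih =>
    intro t tr
    simp only [pvTrimA, pvTrimCore]
    split_ifs with h <;> simp [ih]

-- trimming a list ending in m: if the rest already reaches the limit, m is never seen
theorem pvTrimCore_append (m : List (String × String)) (l : List (List (String × String))) :
    ∀ total, total < pvMaxChars →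
      pvTrimCore (l ++ [m]) total
        = if pvMaxChars ≤ total + (l.map pvContentLen).sum then pvTrimCore l total else l ++ [m] := by
  induction l with
  | nil =>
    intro t ht
    simp only [List.nil_append, List.map_nil, List.sum_nil, Nat.add_zero]
    rw [if_neg (by omega)]
    simp only [pvTrimCore]
    split_ifs <;> rfl
  | cons a l' ih =>
    intro t ht
    simp only [List.cons_append, pvTrimCore, List.map_cons, List.sum_cons]
    by_cases h1 : pvMaxChars ≤ t + pvContentLen a
    · simp only [if_pos h1]
      rw [if_pos (by omega : pvMaxChars ≤ t + (pvContentLen a + (List.map pvContentLen l').sum))]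
    · simp only [if_neg h1]
      rw [ih (t + pvContentLen a) (by omega)]
      by_cases h2 : pvMaxChars ≤ t + pvContentLen a + (l'.map pvContentLen).sum
      · rw [if_pos h2,
          if_pos (by omega : pvMaxChars ≤ t + (pvContentLen a + (List.map pvContentLen l').sum))]
      · rw [if_neg h2,
          if_neg (by omega : ¬ pvMaxChars ≤ t + (pvContentLen a + (List.map pvContentLen l').sum))]

theorem pvTrim_eq_drop (l : List (List (String × String))) :
    (pvTrimCore l.reverse 0).reverse = pvDropB l ((l.map pvContentLen).sum) := by
  induction l with
  | nil => simp [pvTrimCore, pvDropB]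
  | cons m rest ih =>
    have hmax : (0 : Nat) < pvMaxChars := by decide
    simp only [List.reverse_cons]
    rw [pvTrimCore_append m rest.reverse 0 hmax]
    simp only [List.map_reverse, List.sum_reverse, Nat.zero_add]
    simp only [pvDropB, List.map_cons, List.sum_cons, Nat.add_sub_cancel_left]
    by_cases h : pvMaxChars ≤ (rest.map pvContentLen).sum
    · rw [if_pos h, if_pos h, ih]
    · rw [if_neg h, if_neg h]
      simp

-- ===== VERDICT (by name: the statement is the Claim_ definition above) =====
theorem build_truncated_history_spec : Claim_equal_build_truncated_history := by
  intro turns _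
  unfold Spec_build_truncated_history build_truncated_history build_truncated_history_alt
  simp only [pvBuild_eq]
  by_cases h : pvBuildB turns = []
  · simp [h, pvDropB]
  · rw [if_neg h, pvTrimA_eq_core, List.nil_append, pvTrim_eq_drop]
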